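-- pv_equiv track=rewrite | github.com/PNaharro/Dam1 | Uf2/Recursividad1/Ex10.py | compruebaIndices
-- ===== SOURCE A (Python) =====
-- def compruebaIndices(v1):
--     resultado = False
--     if len(v1) == 0:
--         return resultado
--     elif v1[-1] == len(v1)-1:
--         resultado = True
--         return resultado
--     else:
--         resultado = compruebaIndices(v1[:-1])
--         return resultado
-- ===== SOURCE B (Python) =====
-- def compruebaIndices(v1):
--     return any(x == i for i, x in enumerate(v1))
-- ===== Notes on version B (the rewrite author's own statement) =====
-- stated objective: idiomatic
-- what changed: Replaced the back-to-front recursion over v1[:-1] slices (which copies the list at every step) with a single forward any-over-enumerate pass.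
import Mathlib
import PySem

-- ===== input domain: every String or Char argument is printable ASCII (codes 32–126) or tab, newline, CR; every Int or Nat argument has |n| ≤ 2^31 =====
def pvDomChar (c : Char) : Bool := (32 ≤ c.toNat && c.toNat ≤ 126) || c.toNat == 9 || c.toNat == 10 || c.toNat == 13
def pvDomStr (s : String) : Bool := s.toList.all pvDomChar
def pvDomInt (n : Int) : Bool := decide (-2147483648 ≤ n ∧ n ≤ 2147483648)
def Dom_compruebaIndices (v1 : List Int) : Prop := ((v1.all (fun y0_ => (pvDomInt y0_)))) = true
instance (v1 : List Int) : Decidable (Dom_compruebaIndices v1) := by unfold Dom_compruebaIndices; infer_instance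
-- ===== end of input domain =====

-- B replaces A's recursion over v1[:-1] slices with a single forward any-over-enumerate pass (idiomatic, avoids slice copies).

-- ===== PORT A =====
def compruebaIndices (v1 : List Int) : Bool :=
  if h : v1.length = 0 then false
  else if PySem.List.pyGet? v1 (-1) = some ((v1.length : Int) - 1) then true
  else compruebaIndices v1.dropLast
termination_by v1.length
decreasing_by
  simp [List.length_dropLast]
  omega

-- ===== PORT B =====
def compruebaIndices_alt (v1 : List Int) : Bool :=
  (PySem.List.enumerate v1).any (fun p => p.2 == p.1)

-- ===== PRECONDITION & SPEC =====
def Spec_compruebaIndices (v1 : List Int) (out : Bool) : Prop := out = compruebaIndices_alt v1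
instance (v1 : List Int) (out : Bool) : Decidable (Spec_compruebaIndices v1 out) := by unfold Spec_compruebaIndices; infer_instance

-- ===== CLAIM (what is proved, stated in full; the proofs are below) =====
def Claim_equal_compruebaIndices : Prop := ∀ (v1 : List Int), Dom_compruebaIndices v1 → Spec_compruebaIndices v1 (compruebaIndices v1)

-- ===== LEMMAS AND PROOFS =====

theorem enumerate_append_singleton (l : List Int) (a : Int) (s : Int) :
    PySem.List.enumerate (l ++ [a]) s
      = PySem.List.enumerate l s ++ [((s + l.length : Int), a)] := by
  induction l generalizing s with
  | nil => simp [PySem.List.enumerate_nil, PySem.List.enumerate_cons]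
  | cons x xs ih =>
      simp [PySem.List.enumerate_cons, ih]
      ring_nf

theorem alt_append_singleton (l : List Int) (a : Int) :
    compruebaIndices_alt (l ++ [a])
      = (compruebaIndices_alt l || (a == (l.length : Int))) := by
  simp [compruebaIndices_alt, enumerate_append_singleton]

theorem A_eq_B (v1 : List Int) : compruebaIndices v1 = compruebaIndices_alt v1 := by
  induction v1 using List.reverseRecOn with
  | nil =>
      rw [compruebaIndices.eq_def]
      simp [compruebaIndices_alt, PySem.List.enumerate_nil]
  | append_singleton l a ih =>
      rw [compruebaIndices.eq_def, alt_append_singleton]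
      simp only [List.length_append, List.length_cons, List.length_nil,
        PySem.List.pyGet?_neg_one_append_singleton, List.dropLast_concat]
      by_cases h : a = (l.length : Int)
      · simp [h]
      · have e : ((l.length : Int) + 1 - 1) = (l.length : Int) := by ring
        simp [e, h, ih]

-- ===== VERDICT (by name: the statement is the Claim_ definition above) =====
theorem compruebaIndices_spec : Claim_equal_compruebaIndices := by
  intro v1 _
  exact A_eq_B v1
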